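-- pv_equiv track=rewrite | github.com/lei-nlp-lab/logical_subspace_acl_2026 | rebuttal/FineLogic/src/convert_prontoqa_preds_to_finelogic.py | estimate_steps_from_with_proof
-- ===== SOURCE A (Python) =====
-- from typing import Any, Dict, List, Optional
--
-- def estimate_steps_from_with_proof(text: str) -> Optional[int]:
--     """
--     Heuristic for ProntoQA NL/FOL *_with_proof text:
--     count non-empty proof lines between question line and "The query is ...".
--     """
--     if not text:
--         return None
--     lines = [ln.strip() for ln in text.splitlines()]
--     if not lines:
--         return None
--
--     q_idx = None
--     end_idx = None
--     for i, ln in enumerate(lines):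
--         low = ln.lower()
--         if q_idx is None and ("true or false:" in low or "question:" in low):
--             q_idx = i
--         if "the query is" in low:
--             end_idx = i
--             break
--
--     if q_idx is None or end_idx is None or end_idx <= q_idx:
--         return None
--
--     body = [ln for ln in lines[q_idx + 1 : end_idx] if ln]
--     return len(body) if body else None
-- ===== SOURCE B (Python) =====
-- def estimate_steps_from_with_proof(text):
--     """Single-pass state machine: scan stripped lines, start counting after the
--     question marker, return the count at the query marker."""
--     if not text:
--         return None
--     started = False
--     count = 0
--     for raw in text.splitlines():
--         ln = raw.strip()
--         low = ln.lower()
--         if "the query is" in low: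
--             return count if (started and count > 0) else None
--         if not started:
--             if "true or false:" in low or "question:" in low:
--                 started = True
--         elif ln:
--             count += 1
--     return None
-- ===== Notes on version B (the rewrite author's own statement) =====
-- stated objective: simpler
-- what changed: Replaced A's index-collection loop plus slice-and-filter pass over the line list with a single-pass state machine (started flag + running count) that returns the count directly at the query marker.
import Mathlib
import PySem

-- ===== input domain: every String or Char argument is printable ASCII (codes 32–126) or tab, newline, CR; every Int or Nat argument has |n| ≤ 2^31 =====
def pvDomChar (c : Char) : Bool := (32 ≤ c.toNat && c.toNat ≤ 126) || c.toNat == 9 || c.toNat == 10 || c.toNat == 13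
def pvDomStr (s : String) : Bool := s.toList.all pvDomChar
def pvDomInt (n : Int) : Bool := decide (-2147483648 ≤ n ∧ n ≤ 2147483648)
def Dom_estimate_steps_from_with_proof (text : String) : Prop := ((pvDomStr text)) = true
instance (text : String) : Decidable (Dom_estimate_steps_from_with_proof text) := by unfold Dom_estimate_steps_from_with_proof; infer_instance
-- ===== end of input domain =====

-- B replaces A's two-phase index-collection + slice/filter with a single-pass
-- state machine (started flag + running count); objective: simpler, same cost.

-- ===== PORT A =====
-- the index-finding for-loop of A: state q_idx, returns (q_idx, end_idx); break = return
def pvA_loop : List (Int × String) → Option Int → Option Int × Option Int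
  | [], q => (q, none)
  | (i, ln) :: rest, q =>
    let low := PySem.Str.lower ln
    let q' := if q = none ∧ (PySem.Str.isIn "true or false:" low || PySem.Str.isIn "question:" low)
              then some i else q
    if PySem.Str.isIn "the query is" low then (q', some i)
    else pvA_loop rest q'

def estimate_steps_from_with_proof (text : String) : Option Int :=
  if text = "" then none
  else
    let lines := (PySem.Str.splitlines text).map PySem.Str.strip
    if lines = [] then none
    else
      match pvA_loop (PySem.List.enumerate lines 0) none with
      | (some q, some e) =>
        if e ≤ q then none
        else
          let body := (PySem.List.slice lines (some (q + 1)) (some e)).filter (fun ln => ln ≠ "")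
          if body = [] then none else some (body.length : Int)
      | _ => none

-- ===== PORT B =====
-- single pass: strip each raw line, return count at the query marker
def pvB_loop : List String → Bool → Int → Option Int
  | [], _, _ => none
  | raw :: rest, started, count =>
    let ln := PySem.Str.strip raw
    let low := PySem.Str.lower ln
    if PySem.Str.isIn "the query is" low then
      if started && count > 0 then some count else none
    else if !started then
      if PySem.Str.isIn "true or false:" low || PySem.Str.isIn "question:" low
      then pvB_loop rest true count
      else pvB_loop rest false count
    else if ln ≠ "" then pvB_loop rest started (count + 1)
    else pvB_loop rest started count

def estimate_steps_from_with_proof_alt (text : String) : Option Int :=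
  if text = "" then none
  else pvB_loop (PySem.Str.splitlines text) false 0

-- ===== PRECONDITION & SPEC =====
def Spec_estimate_steps_from_with_proof (text : String) (out : Option Int) : Prop := out = estimate_steps_from_with_proof_alt text
instance (text : String) (out : Option Int) : Decidable (Spec_estimate_steps_from_with_proof text out) := by unfold Spec_estimate_steps_from_with_proof; infer_instance

-- ===== CLAIM (what is proved, stated in full; the proofs are below) =====
def Claim_equal_estimate_steps_from_with_proof : Prop := ∀ (text : String), Dom_estimate_steps_from_with_proof text → Spec_estimate_steps_from_with_proof text (estimate_steps_from_with_proof text)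

-- ===== LEMMAS AND PROOFS =====

-- the two marker tests, on an (already stripped) line
def pvE (ln : String) : Bool := PySem.Str.isIn "the query is" (PySem.Str.lower ln)
def pvQ (ln : String) : Bool :=
  PySem.Str.isIn "true or false:" (PySem.Str.lower ln) || PySem.Str.isIn "question:" (PySem.Str.lower ln)

-- B's loop on pre-stripped lines
def pvB_core : List String → Bool → Int → Option Int
  | [], _, _ => none
  | ln :: rest, started, count =>
    if pvE ln then (if started && count > 0 then some count else none)
    else if !started then
      (if pvQ ln then pvB_core rest true count else pvB_core rest false count)
    else if ln ≠ "" then pvB_core rest started (count + 1)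
    else pvB_core rest started count

theorem pvB_loop_eq_core : ∀ (L : List String) (s : Bool) (c : Int),
    pvB_loop L s c = pvB_core (L.map PySem.Str.strip) s c := by
  intro L
  induction L with
  | nil => intro s c; rfl
  | cons x xs ih =>
    intro s c
    simp only [pvB_loop, pvB_core, List.map_cons, pvE, pvQ]
    split_ifs <;> simp [ih]

-- Nat-indexed characterisation of A's loop result (relative indices)
def pvStat : List String → Option Nat × Option Nat
  | [] => (none, none)
  | x :: xs =>
    if pvE x then ((if pvQ x then some 0 else none), some 0)
    else if pvQ x then (some 0, (List.findIdx? pvE xs).map (· + 1))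
    else ((pvStat xs).1.map (· + 1), (pvStat xs).2.map (· + 1))

-- phase 2: once q_idx is set, A's loop just finds the first query line
theorem pvA_loop_some : ∀ (L : List String) (k qv : Int),
    pvA_loop (PySem.List.enumerate L k) (some qv)
      = (some qv, Option.map (fun j : Nat => k + (j : Int)) (List.findIdx? pvE L)) := by
  intro L
  induction L with
  | nil => intro k qv; simp [pvA_loop, PySem.List.enumerate_nil]
  | cons x xs ih =>
    intro k qv
    rw [PySem.List.enumerate_cons]
    show (if pvE x = true then _ else pvA_loop (PySem.List.enumerate xs (k+1))
           (if (some qv : Option Int) = none ∧ (pvQ x = true) then some k else some qv)) = _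
    rw [List.findIdx?_cons]
    by_cases he : pvE x
    · simp [he]
    · simp only [he, Bool.false_eq_true, if_false, reduceCtorEq, false_and, ih]
      cases h : List.findIdx? pvE xs with
      | none => simp
      | some j => simp; push_cast; ring


theorem pvA_loop_none : ∀ (L : List String) (k : Int),
    pvA_loop (PySem.List.enumerate L k) none
      = (Option.map (fun j : Nat => k + (j : Int)) (pvStat L).1,
         Option.map (fun j : Nat => k + (j : Int)) (pvStat L).2) := by
  intro L
  induction L with
  | nil => intro k; simp [pvA_loop, pvStat, PySem.List.enumerate_nil]
  | cons x xs ih =>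
    intro k
    rw [PySem.List.enumerate_cons]
    show (if pvE x = true then ((if (none : Option Int) = none ∧ (pvQ x = true) then some k else none), some k)
          else pvA_loop (PySem.List.enumerate xs (k+1))
            (if (none : Option Int) = none ∧ (pvQ x = true) then some k else none)) = _
    simp only [pvStat]
    by_cases he : pvE x <;> by_cases hq : pvQ x
    · simp [he, hq]
    · simp [he, hq]
    · simp only [he, Bool.false_eq_true, if_false, hq, if_true, and_true, true_and, ite_true,
        pvA_loop_some]
      cases h : List.findIdx? pvE xs with
      | none => simp
      | some j => simp; push_cast; ring
    · simp only [he, Bool.false_eq_true, if_false, hq, and_false, ite_false, ih]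
      cases h1 : (pvStat xs).1 <;> cases h2 : (pvStat xs).2 <;>
        simp <;> push_cast <;> ring_nf <;> simp

-- A's final answer as a function of pvStat, with Nat arithmetic
def pvFinal (L : List String) : Option Int :=
  match pvStat L with
  | (some q, some e) =>
    if e ≤ q then none
    else
      let body := ((L.drop (q + 1)).take (e - (q + 1))).filter (fun ln => ln ≠ "")
      if body = [] then none else some (body.length : Int)
  | _ => none

-- phase-2 value of B's core loop
theorem pvB_core_true : ∀ (L : List String) (c : Int),
    pvB_core L true c
      = match List.findIdx? pvE L with
        | none => none
        | some j =>
          let n := c + ((L.take j).countP (fun ln => ln ≠ "") : Int)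
          if n > 0 then some n else none := by
  intro L
  induction L with
  | nil => intro c; rfl
  | cons x xs ih =>
    intro c
    simp only [pvB_core, List.findIdx?_cons]
    by_cases he : pvE x
    · simp [he]
    · simp only [he, Bool.false_eq_true, if_false, Bool.not_true, ite_false, cond_false]
      by_cases hx : x = ""
      · subst hx
        simp only [ne_eq, not_true_eq_false, decide_false, Bool.false_eq_true, if_false, ih]
        cases h : List.findIdx? pvE xs with
        | none => simp
        | some j => simp [List.take_succ_cons, List.countP_cons, Option.map_some]
      · simp only [ne_eq, hx, not_false_eq_true, decide_true, if_true, ih]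
        cases h : List.findIdx? pvE xs with
        | none => simp
        | some j =>
          simp only [Option.map_some, List.take_succ_cons, List.countP_cons]
          split_ifs <;> simp_all <;> omega

theorem pvFinal_eq_core : ∀ (L : List String), pvFinal L = pvB_core L false 0 := by
  intro L
  induction L with
  | nil => rfl
  | cons x xs ih =>
    by_cases he : pvE x
    · by_cases hq : pvQ x <;> simp [pvFinal, pvStat, pvB_core, he, hq]
    · have he' : pvE x = false := by simpa using he
      by_cases hq : pvQ x
      · simp only [pvFinal, pvStat, pvB_core, he', hq, Bool.false_eq_true, if_false, if_true,
          Bool.not_false, ite_true, ite_false, cond_true, pvB_core_true]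
        cases h : List.findIdx? pvE xs with
        | none => simp
        | some j =>
          simp only [Option.map_some, zero_add]
          have h1 : ¬ (j + 1 ≤ 0) := by omega
          simp only [h1, if_false, List.drop_succ_cons, List.drop_zero, Nat.add_sub_cancel]
          rw [List.countP_eq_length_filter]
          by_cases hA : List.filter (fun ln => decide (ln ≠ "")) (List.take j xs) = []
          · rw [if_pos hA, hA]
            simp
          · rw [if_neg hA]
            have hp : (0:Int) < ((List.filter (fun ln => decide (ln ≠ "")) (List.take j xs)).length : Int) := by
              exact_mod_cast List.length_pos_of_ne_nil hA
            rw [if_pos hp]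
      · have hq' : pvQ x = false := by simpa using hq
        simp only [pvFinal, pvStat, pvB_core, he', hq', Bool.false_eq_true, if_false, ite_false,
          Bool.not_false, cond_true, ite_true]
        rw [← ih]
        simp only [pvFinal]
        cases hs : pvStat xs with
        | mk q? e? =>
          cases q? <;> cases e? <;>
            simp [List.drop_succ_cons, Nat.add_le_add_iff_right, Nat.succ_sub_succ]

-- top-level A in terms of pvFinal
theorem pvA_eq_final (text : String) :
    estimate_steps_from_with_proof text
      = if text = "" then none
        else pvFinal ((PySem.Str.splitlines text).map PySem.Str.strip) := by
  by_cases ht : text = ""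
  · simp [estimate_steps_from_with_proof, ht]
  · simp only [estimate_steps_from_with_proof, ht, if_false]
    set L := (PySem.Str.splitlines text).map PySem.Str.strip with hL
    by_cases hnil : L = []
    · simp [hnil, pvFinal, pvStat]
    · simp only [hnil, if_false]
      rw [pvA_loop_none L 0]
      cases hs : pvStat L with
      | mk q? e? =>
        cases q? with
        | none => cases e? <;> simp [pvFinal, hs]
        | some q =>
          cases e? with
          | none => simp [pvFinal, hs]
          | some e =>
            simp only [pvFinal, hs, Option.map_some, zero_add]
            by_cases hle : e ≤ q
            · have h1 : ((e : Int) ≤ (q : Int)) := by exact_mod_cast hle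
              rw [if_pos h1, if_pos hle]
            · have h1 : ¬ ((e : Int) ≤ (q : Int)) := by exact_mod_cast hle
              rw [if_neg h1, if_neg hle]
              have hq1 : (0:Int) ≤ (q : Int) + 1 := by positivity
              have he0 : (0:Int) ≤ (e : Int) := by positivity
              rw [PySem.List.slice_toNat _ hq1 he0]
              have ht1 : ((q : Int) + 1).toNat = q + 1 := by omega
              have ht2 : ((e : Int)).toNat = e := by omega
              rw [ht1, ht2]

-- ===== VERDICT (by name: the statement is the Claim_ definition above) =====
theorem estimate_steps_from_with_proof_spec : Claim_equal_estimate_steps_from_with_proof := by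
  intro text _
  unfold Spec_estimate_steps_from_with_proof
  rw [pvA_eq_final]
  by_cases ht : text = ""
  · simp [estimate_steps_from_with_proof_alt, ht]
  · simp only [ht, if_false, estimate_steps_from_with_proof_alt]
    rw [pvB_loop_eq_core, pvFinal_eq_core]
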